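-- pv_equiv track=rewrite | github.com/newaetech/chipwhisperer | software/chipwhisperer/analyzer/attacks/attack_mix_columns.py | inc_vec
-- ===== SOURCE A (Python) =====
-- def inc_vec(x):
--     for i in range(4):
--         r = range(4*i, 4*i + 4)
--         if x in r:
--             x += 1
--             if not (x in r):
--                 x = r[0]
--
--     return x
-- ===== SOURCE B (Python) =====
-- def inc_vec(x):
--     if 0 <= x <= 15:
--         return 4 * (x // 4) + (x + 1) % 4
--     return x
-- ===== Notes on version B (the rewrite author's own statement) =====
-- stated objective: simpler
-- what changed: Replaces the loop that scans the four candidate blocks with a closed-form arithmetic computation of the block base plus the wrapped offset for in-range values, passing other values through unchanged.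
import Mathlib
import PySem

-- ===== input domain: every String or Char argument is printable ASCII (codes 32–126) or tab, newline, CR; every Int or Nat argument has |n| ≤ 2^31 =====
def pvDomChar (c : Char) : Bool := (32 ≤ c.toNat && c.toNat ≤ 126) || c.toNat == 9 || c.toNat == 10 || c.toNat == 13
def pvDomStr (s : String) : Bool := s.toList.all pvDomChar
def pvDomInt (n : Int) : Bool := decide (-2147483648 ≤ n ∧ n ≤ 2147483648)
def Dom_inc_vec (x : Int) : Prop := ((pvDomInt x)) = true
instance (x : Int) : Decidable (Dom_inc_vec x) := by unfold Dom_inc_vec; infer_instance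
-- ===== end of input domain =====

-- B replaces A's four-iteration block scan with a closed-form base+wrapped-offset computation (simpler).


-- ===== PORT A =====
-- loop body: r = range(4*i, 4*i+4); 'x in r' is the membership test 4*i ≤ x < 4*i+4; r[0] = 4*i
def incVecStep (x : Int) (i : Int) : Int :=
  if 4 * i ≤ x ∧ x < 4 * i + 4 then
    if ¬ (4 * i ≤ x + 1 ∧ x + 1 < 4 * i + 4) then 4 * i else x + 1
  else x

def inc_vec (x : Int) : Int :=
  (PySem.List.pyRange 0 4 1).foldl incVecStep x

-- ===== PORT B =====
def inc_vec_alt (x : Int) : Int :=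
  if 0 ≤ x ∧ x ≤ 15 then
    4 * (PySem.Int.floordiv x 4) + PySem.Int.mod (x + 1) 4
  else x

-- ===== PRECONDITION & SPEC =====
def Spec_inc_vec (x : Int) (out : Int) : Prop := out = inc_vec_alt x
instance (x : Int) (out : Int) : Decidable (Spec_inc_vec x out) := by unfold Spec_inc_vec; infer_instance

-- ===== CLAIM (what is proved, stated in full; the proofs are below) =====
def Claim_equal_inc_vec : Prop := ∀ (x : Int), Dom_inc_vec x → Spec_inc_vec x (inc_vec x)

-- ===== LEMMAS AND PROOFS =====

theorem inc_vec_unfold (x : Int) :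
    inc_vec x = incVecStep (incVecStep (incVecStep (incVecStep x 0) 1) 2) 3 := by
  simp [inc_vec, PySem.List.pyRange, List.range_succ]

-- ===== VERDICT (by name: the statement is the Claim_ definition above) =====
theorem inc_vec_spec : Claim_equal_inc_vec := by
  intro x _
  show inc_vec x = inc_vec_alt x
  rw [inc_vec_unfold]
  by_cases h : 0 ≤ x ∧ x ≤ 15
  · obtain ⟨h0, h1⟩ := h
    interval_cases x <;> decide
  · have step : ∀ (i : Int), ¬ (4 * i ≤ x ∧ x < 4 * i + 4) → incVecStep x i = x := by
      intro i hi
      simp only [incVecStep]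
      rw [if_neg hi]
    have hA : incVecStep (incVecStep (incVecStep (incVecStep x 0) 1) 2) 3 = x := by
      rw [step 0 (by omega), step 1 (by omega), step 2 (by omega), step 3 (by omega)]
    have hB : inc_vec_alt x = x := by
      simp only [inc_vec_alt]
      rw [if_neg h]
    rw [hA, hB]
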